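-- pv_equiv track=rewrite | github.com/mhems/aoc | 2016/day2/a.py | follow2
-- ===== SOURCE A (Python) =====
-- def follow2(initial, path: str) -> str:
--     pos = str(initial)
--     for dir in path:
--         if dir == 'U':
--             if pos in '678':
--                 pos = '234'['678'.index(pos)]
--             elif pos in 'ABC':
--                 pos = '678'['ABC'.index(pos)]
--             elif pos == 'D':
--                 pos = 'B'
--             elif pos == '3':
--                 pos = '1'
--         elif dir == 'D':
--             if pos in '234':
--                 pos = '678'['234'.index(pos)]
--             elif pos in '678':
--                 pos = 'ABC'['678'.index(pos)]
--             elif pos == '1':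
--                 pos = '3'
--             elif pos == 'B':
--                 pos = 'D'
--         elif dir == 'L':
--             if pos in '48C':
--                 pos = '37B'['48C'.index(pos)]
--             elif pos in '37B':
--                 pos = '26A'['37B'.index(pos)]
--             elif pos == '9':
--                 pos = '8'
--             elif pos == '6':
--                 pos = '5'
--         else:
--             if pos in '26A':
--                 pos = '37B'['26A'.index(pos)]
--             elif pos in '37B':
--                 pos = '48C'['37B'.index(pos)]
--             elif pos == '5':
--                 pos = '6'
--             elif pos == '8':
--                 pos = '9'
--     return pos
-- ===== SOURCE B (Python) =====
-- # Keypad as coordinate maps: key -> (row, col), inverse (row, col) -> key,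
-- # and a delta per direction (anything but U/D/L means Right, as in the original).
-- KEYS = {'1': (0, 2),
--         '2': (1, 1), '3': (1, 2), '4': (1, 3),
--         '5': (2, 0), '6': (2, 1), '7': (2, 2), '8': (2, 3), '9': (2, 4),
--         'A': (3, 1), 'B': (3, 2), 'C': (3, 3),
--         'D': (4, 2)}
-- COORD = {v: k for k, v in KEYS.items()}
-- DELTAS = {'U': (-1, 0), 'D': (1, 0), 'L': (0, -1)}
--
-- def follow2(initial, path: str) -> str:
--     pos = str(initial)
--     for d in path:
--         coord = KEYS.get(pos)
--         if coord is not None: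
--             dr, dc = DELTAS.get(d, (0, 1))
--             nxt = COORD.get((coord[0] + dr, coord[1] + dc))
--             if nxt is not None:
--                 pos = nxt
--     return pos
-- ===== Notes on version B (the rewrite author's own statement) =====
-- stated objective: simpler
-- what changed: Replaces A's 16-branch per-direction transition table (substring tests plus .index into row strings) by a keypad-geometry lookup: key -> grid coordinate, add a direction delta, move only if the target coordinate is a key; constant-factor speedup from two dict lookups per step instead of a chain of substring scans.
-- intended difference: On an initial that is not a single character (empty or multi-character) but is a contiguous substring of a keypad row consulted by some direction in path, A's Python substring test ('' in '678', '67' in '678') accidentally treats it as a key and returns a key of the pad, while B passes such a non-key initial through unchanged, which is the intended behaviour. — e.g. on follow2("", "U"): A returns "2", B returns ""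
import Mathlib
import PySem

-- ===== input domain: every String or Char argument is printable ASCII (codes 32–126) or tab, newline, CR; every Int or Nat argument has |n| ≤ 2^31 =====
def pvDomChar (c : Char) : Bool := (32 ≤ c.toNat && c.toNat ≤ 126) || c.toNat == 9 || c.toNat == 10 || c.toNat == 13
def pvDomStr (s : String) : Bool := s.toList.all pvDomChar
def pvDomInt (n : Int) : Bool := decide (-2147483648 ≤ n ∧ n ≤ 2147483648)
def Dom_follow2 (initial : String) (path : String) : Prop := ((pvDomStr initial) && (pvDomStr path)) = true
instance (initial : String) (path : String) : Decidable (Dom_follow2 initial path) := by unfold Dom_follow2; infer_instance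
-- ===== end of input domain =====

-- B replaces A's 16-branch transition table by a keypad-geometry lookup: key -> grid
-- coordinate, move by a direction delta, move only if the target coordinate is a key.

-- ===== PORT A =====
-- '234'['678'.index(pos)]: the index of a found substring of a 3-char table is always
-- in range of the (3-char) target table, so the getD default is unreachable.
def pickA (tbl : String) (i : Int) : String :=
  String.singleton ((PySem.Str.pyGet? tbl i).getD ' ')

def stepA (pos : String) (dir : Char) : String :=
  if dir = 'U' then
    if PySem.Str.isIn pos "678" then pickA "234" (PySem.Str.find "678" pos)
    else if PySem.Str.isIn pos "ABC" then pickA "678" (PySem.Str.find "ABC" pos)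
    else if pos = "D" then "B"
    else if pos = "3" then "1"
    else pos
  else if dir = 'D' then
    if PySem.Str.isIn pos "234" then pickA "678" (PySem.Str.find "234" pos)
    else if PySem.Str.isIn pos "678" then pickA "ABC" (PySem.Str.find "678" pos)
    else if pos = "1" then "3"
    else if pos = "B" then "D"
    else pos
  else if dir = 'L' then
    if PySem.Str.isIn pos "48C" then pickA "37B" (PySem.Str.find "48C" pos)
    else if PySem.Str.isIn pos "37B" then pickA "26A" (PySem.Str.find "37B" pos)
    else if pos = "9" then "8"
    else if pos = "6" then "5"
    else pos
  else
    if PySem.Str.isIn pos "26A" then pickA "37B" (PySem.Str.find "26A" pos)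
    else if PySem.Str.isIn pos "37B" then pickA "48C" (PySem.Str.find "37B" pos)
    else if pos = "5" then "6"
    else if pos = "8" then "9"
    else pos

def follow2 (initial : String) (path : String) : String :=
  path.toList.foldl stepA initial

-- ===== PORT B =====
def keysB : PySem.Dict String (Int × Int) :=
  PySem.Dict.ofList [("1", (0, 2)),
    ("2", (1, 1)), ("3", (1, 2)), ("4", (1, 3)),
    ("5", (2, 0)), ("6", (2, 1)), ("7", (2, 2)), ("8", (2, 3)), ("9", (2, 4)),
    ("A", (3, 1)), ("B", (3, 2)), ("C", (3, 3)),
    ("D", (4, 2))]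

def coordB : PySem.Dict (Int × Int) String :=
  PySem.Dict.ofList (keysB.items.map (fun p => (p.2, p.1)))

def deltasB : PySem.Dict Char (Int × Int) :=
  PySem.Dict.ofList [('U', (-1, 0)), ('D', (1, 0)), ('L', (0, -1))]

def stepB (pos : String) (d : Char) : String :=
  match keysB.get? pos with
  | none => pos
  | some c =>
      let del := deltasB.getD d (0, 1)
      match coordB.get? (c.1 + del.1, c.2 + del.2) with
      | some nxt => nxt
      | none => pos

def follow2_alt (initial : String) (path : String) : String :=
  path.toList.foldl stepB initial

-- ===== PRECONDITION & SPEC =====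
-- On an initial that is not a single character (empty, or several characters) but is a
-- contiguous substring of a keypad row consulted by some direction in path, A's Python
-- substring test ('' in '678', '67' in '678') accidentally treats it as a key and A
-- returns some key of the pad, while B passes such a non-key initial through unchanged,
-- which is the intended behaviour.
def pvFires (pos : String) (d : Char) : Bool :=
  if d = 'U' then PySem.Chars.isIn pos.toList ['6', '7', '8'] || PySem.Chars.isIn pos.toList ['A', 'B', 'C']
  else if d = 'D' then PySem.Chars.isIn pos.toList ['2', '3', '4'] || PySem.Chars.isIn pos.toList ['6', '7', '8']
  else if d = 'L' then PySem.Chars.isIn pos.toList ['4', '8', 'C'] || PySem.Chars.isIn pos.toList ['3', '7', 'B']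
  else PySem.Chars.isIn pos.toList ['2', '6', 'A'] || PySem.Chars.isIn pos.toList ['3', '7', 'B']

def D_follow2 (initial : String) (path : String) : Prop :=
  initial.length ≠ 1 ∧ path.toList.any (pvFires initial) = true

instance (initial : String) (path : String) : Decidable (D_follow2 initial path) := by
  unfold D_follow2; infer_instance

def Spec_follow2 (initial : String) (path : String) (out : String) : Prop :=
  ¬ D_follow2 initial path → out = follow2_alt initial path
instance (initial : String) (path : String) (out : String) : Decidable (Spec_follow2 initial path out) := by unfold Spec_follow2; infer_instance

def pvDiffWitness_follow2 : String × String := ("", "U")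
def pvDiffWitnessOut_follow2 : String × String := ("2", "")

-- ===== CLAIM (what is proved, stated in full; the proofs are below) =====
def Claim_unchanged_follow2 : Prop := ∀ (initial : String) (path : String), Dom_follow2 initial path → Spec_follow2 initial path (follow2 initial path)
def Claim_changed_follow2 : Prop := Dom_follow2 (pvDiffWitness_follow2.1) (pvDiffWitness_follow2.2) ∧ D_follow2 (pvDiffWitness_follow2.1) (pvDiffWitness_follow2.2) ∧ follow2 (pvDiffWitness_follow2.1) (pvDiffWitness_follow2.2) = pvDiffWitnessOut_follow2.1 ∧ follow2_alt (pvDiffWitness_follow2.1) (pvDiffWitness_follow2.2) = pvDiffWitnessOut_follow2.2 ∧ pvDiffWitnessOut_follow2.1 ≠ pvDiffWitnessOut_follow2.2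
def Claim_exact_follow2 : Prop := ∀ (initial : String) (path : String), Dom_follow2 initial path → D_follow2 initial path → follow2 initial path ≠ follow2_alt initial path


-- ===== LEMMAS AND PROOFS =====

def keyChars : List Char := ['1','2','3','4','5','6','7','8','9','A','B','C','D']
def keyList : List String := keyChars.map String.singleton

theorem sing_eq_iff (c x : Char) : (String.singleton c = String.singleton x) ↔ c = x := by
  constructor
  · intro h
    have := congrArg String.toList h
    simpa [String.toList_singleton] using this
  · intro h; rw [h]

theorem sing_len (c : Char) : (String.singleton c).length = 1 := by
  rw [← String.length_toList, String.toList_singleton]; rfl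

theorem exists_sing (p : String) (hl : p.length = 1) : ∃ c, p = String.singleton c := by
  have h1 : p.toList.length = 1 := by rw [String.length_toList]; exact hl
  obtain ⟨c, hc⟩ := List.length_eq_one_iff.mp h1
  exact ⟨c, String.toList_inj.mp (by rw [hc, String.toList_singleton])⟩

theorem keys_len (p : String) (hp : p ∈ keyList) : p.length = 1 := by
  obtain ⟨c, _, rfl⟩ := List.mem_map.mp hp
  exact sing_len c

theorem keysB_keys : PySem.Dict.keys keysB = keyList := by decide

theorem t678 : ("678" : String).toList = ['6','7','8'] := by decide
theorem tABC : ("ABC" : String).toList = ['A','B','C'] := by decide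
theorem t234 : ("234" : String).toList = ['2','3','4'] := by decide
theorem t48C : ("48C" : String).toList = ['4','8','C'] := by decide
theorem t37B : ("37B" : String).toList = ['3','7','B'] := by decide
theorem t26A : ("26A" : String).toList = ['2','6','A'] := by decide

theorem deltas_other (d : Char) (h1 : d ≠ 'U') (h2 : d ≠ 'D') (h3 : d ≠ 'L') :
    deltasB.getD d (0, 1) = (0, 1) := by
  have hm : deltasB = PySem.Dict.mk [('U', (-1, 0)), ('D', (1, 0)), ('L', (0, -1))] := by decide
  rw [hm]
  simp [PySem.Dict.getD_eq_get?_getD, Ne.symm h1, Ne.symm h2, Ne.symm h3, PySem.Dict.get?]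

theorem stepA_other (d : Char) (h1 : d ≠ 'U') (h2 : d ≠ 'D') (h3 : d ≠ 'L') (p : String) :
    stepA p d = stepA p 'R' := by
  simp [stepA, h1, h2, h3]

theorem stepB_other (d : Char) (h1 : d ≠ 'U') (h2 : d ≠ 'D') (h3 : d ≠ 'L') (p : String) :
    stepB p d = stepB p 'R' := by
  have hR : deltasB.getD 'R' (0, 1) = (0, 1) := by decide
  simp [stepB, deltas_other d h1 h2 h3, hR]

set_option maxRecDepth 4000 in
theorem step_key_U : ∀ p ∈ keyList, stepA p 'U' = stepB p 'U' ∧ stepA p 'U' ∈ keyList := by decide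
set_option maxRecDepth 4000 in
theorem step_key_D : ∀ p ∈ keyList, stepA p 'D' = stepB p 'D' ∧ stepA p 'D' ∈ keyList := by decide
set_option maxRecDepth 4000 in
theorem step_key_L : ∀ p ∈ keyList, stepA p 'L' = stepB p 'L' ∧ stepA p 'L' ∈ keyList := by decide
set_option maxRecDepth 4000 in
theorem step_key_R : ∀ p ∈ keyList, stepA p 'R' = stepB p 'R' ∧ stepA p 'R' ∈ keyList := by decide

theorem step_key (p : String) (hp : p ∈ keyList) (d : Char) :
    stepA p d = stepB p d ∧ stepA p d ∈ keyList := by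
  by_cases h1 : d = 'U'
  · exact h1 ▸ step_key_U p hp
  by_cases h2 : d = 'D'
  · exact h2 ▸ step_key_D p hp
  by_cases h3 : d = 'L'
  · exact h3 ▸ step_key_L p hp
  rw [stepA_other d h1 h2 h3, stepB_other d h1 h2 h3]
  exact step_key_R p hp

theorem chars_isIn_false (c : Char) (l : List Char) (h : c ∉ l) :
    PySem.Chars.isIn [c] l = false := by
  refine Bool.eq_false_iff.mpr fun htrue => h ?_
  exact (List.singleton_infix_iff c l).mp ((PySem.Chars.isIn_iff_infix _ _).mp htrue)

theorem step_nonkey (c : Char) (hc : c ∉ keyChars) (d : Char) :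
    stepA (String.singleton c) d = String.singleton c ∧
    stepB (String.singleton c) d = String.singleton c := by
  simp only [keyChars, List.mem_cons, List.not_mem_nil, or_false] at hc
  push Not at hc
  obtain ⟨n1, n2, n3, n4, n5, n6, n7, n8, n9, nA, nB, nC, nD⟩ := hc
  constructor
  · have i1 := chars_isIn_false c ['6','7','8'] (by simp [n6, n7, n8])
    have i2 := chars_isIn_false c ['A','B','C'] (by simp [nA, nB, nC])
    have i3 := chars_isIn_false c ['2','3','4'] (by simp [n2, n3, n4])
    have i4 := chars_isIn_false c ['4','8','C'] (by simp [n4, n8, nC])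
    have i5 := chars_isIn_false c ['3','7','B'] (by simp [n3, n7, nB])
    have i6 := chars_isIn_false c ['2','6','A'] (by simp [n2, n6, nA])
    simp [stepA, i1, i2, i3, i4, i5, i6,
      show ("D":String) = String.singleton 'D' from by decide,
      show ("3":String) = String.singleton '3' from by decide,
      show ("1":String) = String.singleton '1' from by decide,
      show ("B":String) = String.singleton 'B' from by decide,
      show ("9":String) = String.singleton '9' from by decide,
      show ("6":String) = String.singleton '6' from by decide,
      show ("5":String) = String.singleton '5' from by decide,
      show ("8":String) = String.singleton '8' from by decide,
      sing_eq_iff, n1, n3, n5, n6, n8, n9, nB, nD]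
  · have hnone : keysB.get? (String.singleton c) = none := by
      rw [PySem.Dict.get?_eq_none_iff_not_mem_keys, keysB_keys]
      intro hm
      obtain ⟨a, ha, hae⟩ := List.mem_map.mp hm
      rw [sing_eq_iff] at hae
      subst hae
      revert ha
      simp [keyChars, n1, n2, n3, n4, n5, n6, n7, n8, n9, nA, nB, nC, nD]
    simp [stepB, hnone]

theorem stepB_nonsing (p : String) (hl : p.length ≠ 1) (d : Char) : stepB p d = p := by
  have hnone : keysB.get? p = none := by
    rw [PySem.Dict.get?_eq_none_iff_not_mem_keys, keysB_keys]
    exact fun hm => hl (keys_len p hm)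
  simp [stepB, hnone]

theorem chars_isIn_false' (p : String) (l : List Char) (h : ¬ p.toList <:+: l) :
    PySem.Chars.isIn p.toList l = false := by
  refine Bool.eq_false_iff.mpr fun htrue => h ?_
  exact (PySem.Chars.isIn_iff_infix _ _).mp htrue

theorem stepA_nofire (p : String) (hl : p.length ≠ 1) (d : Char) (hf : ¬ pvFires p d = true) :
    stepA p d = p := by
  have hD : p ≠ "D" := fun he => hl (he ▸ (by decide : ("D":String).length = 1))
  have h3 : p ≠ "3" := fun he => hl (he ▸ (by decide : ("3":String).length = 1))
  have h1 : p ≠ "1" := fun he => hl (he ▸ (by decide : ("1":String).length = 1))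
  have hB : p ≠ "B" := fun he => hl (he ▸ (by decide : ("B":String).length = 1))
  have h9 : p ≠ "9" := fun he => hl (he ▸ (by decide : ("9":String).length = 1))
  have h6 : p ≠ "6" := fun he => hl (he ▸ (by decide : ("6":String).length = 1))
  have h5 : p ≠ "5" := fun he => hl (he ▸ (by decide : ("5":String).length = 1))
  have h8 : p ≠ "8" := fun he => hl (he ▸ (by decide : ("8":String).length = 1))
  by_cases hU : d = 'U'
  · subst hU
    simp [pvFires, PySem.Chars.isIn_iff_infix, not_or] at hf
    have i1 := chars_isIn_false' p _ hf.1
    have i2 := chars_isIn_false' p _ hf.2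
    simp [stepA, i1, i2, hD, h3]
  by_cases hV : d = 'D'
  · subst hV
    simp [pvFires, PySem.Chars.isIn_iff_infix, not_or] at hf
    have i1 := chars_isIn_false' p _ hf.1
    have i2 := chars_isIn_false' p _ hf.2
    simp [stepA, i1, i2, h1, hB]
  by_cases hL : d = 'L'
  · subst hL
    simp [pvFires, PySem.Chars.isIn_iff_infix, not_or] at hf
    have i1 := chars_isIn_false' p _ hf.1
    have i2 := chars_isIn_false' p _ hf.2
    simp [stepA, i1, i2, h9, h6]
  · simp only [pvFires, if_neg hU, if_neg hV, if_neg hL, Bool.or_eq_true, not_or, PySem.Chars.isIn_iff_infix] at hf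
    have i1 := chars_isIn_false' p _ hf.1
    have i2 := chars_isIn_false' p _ hf.2
    simp [stepA, hU, hV, hL, i1, i2, h5, h8]

theorem pick_len (t : String) (i : Int) : (pickA t i).length = 1 := sing_len _

theorem fire_len_helper (p t1 t2 a1 a2 r : String)
    (hf : p.toList <:+: t1.toList ∨ p.toList <:+: t2.toList) :
    (if PySem.Str.isIn p t1 then pickA a1 (PySem.Str.find t1 p)
     else if PySem.Str.isIn p t2 then pickA a2 (PySem.Str.find t2 p) else r).length = 1 := by
  by_cases hb : PySem.Str.isIn p t1 = true
  · rw [if_pos hb]; exact pick_len _ _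
  · have h2 : p.toList <:+: t2.toList := by
      rcases hf with h | h
      · exact absurd ((PySem.Str.isIn_iff_infix p t1).mpr h) hb
      · exact h
    rw [if_neg hb, if_pos ((PySem.Str.isIn_iff_infix p t2).mpr h2)]
    exact pick_len _ _

theorem stepA_fire_len (p : String) (d : Char) (hf : pvFires p d = true) : (stepA p d).length = 1 := by
  by_cases hU : d = 'U'
  · subst hU
    simp [pvFires, PySem.Chars.isIn_iff_infix] at hf
    rw [show stepA p 'U' = _ from if_pos rfl]
    exact fire_len_helper p "678" "ABC" "234" "678" _ (by rwa [t678, tABC])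
  by_cases hV : d = 'D'
  · subst hV
    simp [pvFires, PySem.Chars.isIn_iff_infix] at hf
    rw [show stepA p 'D' = _ from if_neg (by decide), show _ = _ from if_pos rfl]
    exact fire_len_helper p "234" "678" "678" "ABC" _ (by rwa [t234, t678])
  by_cases hL : d = 'L'
  · subst hL
    simp [pvFires, PySem.Chars.isIn_iff_infix] at hf
    rw [show stepA p 'L' = _ from if_neg (by decide), show _ = _ from if_neg (by decide),
      show _ = _ from if_pos rfl]
    exact fire_len_helper p "48C" "37B" "37B" "26A" _ (by rwa [t48C, t37B])
  · simp only [pvFires, if_neg hU, if_neg hV, if_neg hL, Bool.or_eq_true, PySem.Chars.isIn_iff_infix] at hf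
    rw [show stepA p d = _ from if_neg hU, show _ = _ from if_neg hV, show _ = _ from if_neg hL]
    exact fire_len_helper p "26A" "37B" "37B" "48C" _ (by rwa [t26A, t37B])

theorem stepA_len_one (p : String) (d : Char) (hl : p.length = 1) : (stepA p d).length = 1 := by
  obtain ⟨c, rfl⟩ := exists_sing p hl
  by_cases hc : c ∈ keyChars
  · exact keys_len _ (step_key _ (List.mem_map_of_mem hc) d).2
  · rw [(step_nonkey c hc d).1]; exact hl

theorem foldA_len_one : ∀ (l : List Char) (p : String), p.length = 1 →
    (l.foldl stepA p).length = 1 := by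
  intro l
  induction l with
  | nil => intro p hp; exact hp
  | cons d l ih => intro p hp; exact ih _ (stepA_len_one p d hp)

theorem foldA_fire : ∀ (l : List Char) (p : String), p.length ≠ 1 →
    (∃ c ∈ l, pvFires p c = true) → (l.foldl stepA p).length = 1 := by
  intro l
  induction l with
  | nil => intro p _ h; simp at h
  | cons d l ih =>
    intro p hl hex
    by_cases hf : pvFires p d = true
    · exact foldA_len_one l _ (stepA_fire_len p d hf)
    · obtain ⟨c, hcl, hcf⟩ := hex
      rcases List.mem_cons.mp hcl with rfl | hcl'
      · exact absurd hcf hf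
      · rw [List.foldl_cons, stepA_nofire p hl d hf]
        exact ih p hl ⟨c, hcl', hcf⟩

theorem foldB_id : ∀ (l : List Char) (p : String), p.length ≠ 1 → l.foldl stepB p = p := by
  intro l
  induction l with
  | nil => intro p _; rfl
  | cons d l ih => intro p hl; rw [List.foldl_cons, stepB_nonsing p hl d]; exact ih p hl

theorem foldA_nofire : ∀ (l : List Char) (p : String), p.length ≠ 1 →
    (∀ c ∈ l, ¬ pvFires p c = true) → l.foldl stepA p = p := by
  intro l
  induction l with
  | nil => intro p _ _; rfl
  | cons d l ih =>
    intro p hl hno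
    rw [List.foldl_cons, stepA_nofire p hl d (hno d List.mem_cons_self)]
    exact ih p hl fun c hc => hno c (List.mem_cons_of_mem d hc)

theorem fold_eq_sing : ∀ (l : List Char) (c : Char),
    l.foldl stepA (String.singleton c) = l.foldl stepB (String.singleton c) := by
  intro l
  induction l with
  | nil => intro c; rfl
  | cons d l ih =>
    intro c
    by_cases hc : c ∈ keyChars
    · obtain ⟨heq, hmem⟩ := step_key _ (List.mem_map_of_mem hc) d
      obtain ⟨c', hc'⟩ := exists_sing _ (keys_len _ hmem)
      rw [List.foldl_cons, List.foldl_cons, ← heq, hc']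
      exact ih c'
    · obtain ⟨ha, hb⟩ := step_nonkey c hc d
      rw [List.foldl_cons, List.foldl_cons, ha, hb]
      exact ih c

-- ===== VERDICT (by name: the statement is the Claim_ definition above) =====
theorem follow2_spec : Claim_unchanged_follow2 := by
  intro initial path _
  unfold Spec_follow2
  intro hnD
  by_cases hl : initial.length = 1
  · obtain ⟨c, rfl⟩ := exists_sing initial hl
    exact fold_eq_sing path.toList c
  · unfold D_follow2 at hnD
    push Not at hnD
    have hno := hnD hl
    rw [Ne, List.any_eq_true] at hno
    push Not at hno
    unfold follow2 follow2_alt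
    rw [foldB_id path.toList initial hl]
    exact foldA_nofire path.toList initial hl hno

set_option maxRecDepth 4000 in
theorem follow2_changed : Claim_changed_follow2 := by
  unfold Claim_changed_follow2; decide

theorem follow2_tight : Claim_exact_follow2 := by
  intro initial path _ hD he
  obtain ⟨hl, hex⟩ := hD
  rw [List.any_eq_true] at hex
  have hA := foldA_fire path.toList initial hl hex
  unfold follow2 follow2_alt at he
  rw [he, foldB_id path.toList initial hl] at hA
  exact hl hA
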